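-- pv_equiv track=rewrite | github.com/daniel-reich/ubiquitous-fiesta | vLRpikwB9dqaR3HAj_16.py | is_ord_sub
-- ===== SOURCE A (Python) =====
-- def is_ord_sub(smlst, biglst):
--
--   Sublist = []
--
--   BC = 0
--   BL = len(biglst)
--
--   SC = 0
--   SL = len(smlst)
--
--   while (SC < SL) and (BC < BL):
--
--     Wanted = smlst[SC]
--     Checking = biglst[BC]
--
--     if (Wanted == Checking):
--       Sublist.append(Wanted)
--       SC += 1
--       BC += 1
--     else:
--       BC += 1
--
--   Test_1A = len(smlst)
--   Test_1B = len(Sublist)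
--
--   if (Test_1A == Test_1B):
--     return True
--   else:
--     return False
-- ===== SOURCE B (Python) =====
-- def is_ord_sub(smlst, biglst):
--     # Index biglst once: value -> sorted list of its positions; then match each
--     # wanted value by binary-searching its position list for the first index
--     # past the previous match.
--     pos = {}
--     for i, v in enumerate(biglst):
--         pos.setdefault(v, []).append(i)
--     cur = -1
--     for x in smlst:
--         idxs = pos.get(x, [])
--         lo, hi = 0, len(idxs)
--         while lo < hi:
--             mid = (lo + hi) // 2
--             if idxs[mid] <= cur:
--                 lo = mid + 1
--             else:
--                 hi = mid
--         if lo == len(idxs):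
--             return False
--         cur = idxs[lo]
--     return True
-- ===== Notes on version B (the rewrite author's own statement) =====
-- stated objective: alternative
-- what changed: Replaces A's single greedy two-cursor scan over biglst with a two-stage occurrence-index algorithm: first build a hash map from each value to the sorted list of its positions in biglst, then match each element of smlst by binary-searching its position list for the first occurrence after the previous match; no cursor ever walks biglst element-by-element during matching.
import Mathlib
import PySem

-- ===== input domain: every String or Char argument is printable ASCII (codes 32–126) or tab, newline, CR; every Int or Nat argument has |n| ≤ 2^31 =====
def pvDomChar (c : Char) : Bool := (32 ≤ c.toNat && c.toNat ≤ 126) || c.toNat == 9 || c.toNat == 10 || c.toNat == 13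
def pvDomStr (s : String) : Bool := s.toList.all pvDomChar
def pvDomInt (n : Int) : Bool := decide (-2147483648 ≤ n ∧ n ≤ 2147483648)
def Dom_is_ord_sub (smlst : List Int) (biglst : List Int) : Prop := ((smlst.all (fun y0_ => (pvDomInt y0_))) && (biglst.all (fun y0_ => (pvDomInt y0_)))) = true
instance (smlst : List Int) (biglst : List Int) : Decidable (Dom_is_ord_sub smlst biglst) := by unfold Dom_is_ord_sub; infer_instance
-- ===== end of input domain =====

-- B replaces A's greedy two-cursor scan with a two-stage algorithm: build a value→positions
-- index of biglst once, then binary-search each wanted value's position list; objective: alternative.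

-- ===== PORT A =====
-- the while loop: state (SC, BC, Sublist); indexing smlst[SC]/biglst[BC] is always in
-- range when the loop body runs (SC < SL, BC < BL), so `[·]?.getD 0` is exact there.
def is_ord_sub_loop (smlst biglst : List Int) (SL BL SC BC : Nat) (Sublist : List Int) : List Int :=
  if _h : SC < SL ∧ BC < BL then
    let Wanted := (smlst[SC]?).getD 0
    let Checking := (biglst[BC]?).getD 0
    if Wanted = Checking then
      is_ord_sub_loop smlst biglst SL BL (SC + 1) (BC + 1) (Sublist ++ [Wanted])
    else
      is_ord_sub_loop smlst biglst SL BL SC (BC + 1) Sublist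
  else
    Sublist
termination_by BL - BC
decreasing_by all_goals omega

def is_ord_sub (smlst : List Int) (biglst : List Int) : Bool :=
  let BL := biglst.length
  let SL := smlst.length
  let Sublist := is_ord_sub_loop smlst biglst SL BL 0 0 []
  let Test_1A := smlst.length
  let Test_1B := Sublist.length
  if Test_1A = Test_1B then true else false

-- ===== PORT B =====
-- pos = {}; for i, v in enumerate(biglst): pos.setdefault(v, []).append(i)
def pvBuildPos (biglst : List Int) : PySem.Dict Int (List Int) :=
  (PySem.List.enumerate biglst).foldl
    (fun d p => d.insert p.2 (d.getD p.2 [] ++ [p.1])) PySem.Dict.empty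

-- the hand-written binary-search while loop of Source B (lo, hi cursors); when the body
-- runs mid < hi ≤ len idxs, so `[·]?.getD 0` is exact there
def pvBisect (idxs : List Int) (cur : Int) (lo hi : Nat) : Nat :=
  if _h : lo < hi then
    -- mid = (lo + hi) // 2
    if (idxs[(lo + hi) / 2]?).getD 0 ≤ cur then pvBisect idxs cur ((lo + hi) / 2 + 1) hi
    else pvBisect idxs cur lo ((lo + hi) / 2)
  else lo
termination_by hi - lo
decreasing_by all_goals omega

-- for x in smlst: … (early return → recursion over smlst carrying cur)
def pvScan (pos : PySem.Dict Int (List Int)) (cur : Int) : List Int → Bool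
  | [] => true
  | x :: xs =>
    let idxs := pos.getD x []
    let lo := pvBisect idxs cur 0 idxs.length
    if lo = idxs.length then false
    else pvScan pos ((idxs[lo]?).getD 0) xs

def is_ord_sub_alt (smlst : List Int) (biglst : List Int) : Bool :=
  pvScan (pvBuildPos biglst) (-1) smlst

-- ===== PRECONDITION & SPEC =====
def Spec_is_ord_sub (smlst : List Int) (biglst : List Int) (out : Bool) : Prop := out = is_ord_sub_alt smlst biglst
instance (smlst : List Int) (biglst : List Int) (out : Bool) : Decidable (Spec_is_ord_sub smlst biglst out) := by unfold Spec_is_ord_sub; infer_instance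

-- ===== CLAIM (what is proved, stated in full; the proofs are below) =====
def Claim_equal_is_ord_sub : Prop := ∀ (smlst : List Int) (biglst : List Int), Dom_is_ord_sub smlst biglst → Spec_is_ord_sub smlst biglst (is_ord_sub smlst biglst)

-- ===== LEMMAS AND PROOFS =====

-- common specification: consume biglst past the first occurrence of each wanted value
def pvConsume (x : Int) : List Int → Option (List Int)
  | [] => none
  | y :: ys => if y = x then some ys else pvConsume x ys

def pvSpec : List Int → List Int → Bool
  | [], _ => true
  | x :: xs, b =>
    match pvConsume x b with
    | none => false
    | some rest => pvSpec xs rest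

---- A-side: the two-cursor loop computes the greedy matched prefix ----

def pvMatched : List Int → List Int → List Int
  | _, [] => []
  | [], _ :: _ => []
  | x :: xs, y :: ys => if x = y then x :: pvMatched xs ys else pvMatched (x :: xs) ys

theorem pvMatched_nil_left (b : List Int) : pvMatched [] b = [] := by
  cases b <;> rfl

theorem is_ord_sub_loop_eq (smlst biglst : List Int) :
    ∀ n BC SC Sub, biglst.length - BC ≤ n →
      is_ord_sub_loop smlst biglst smlst.length biglst.length SC BC Sub
        = Sub ++ pvMatched (smlst.drop SC) (biglst.drop BC) := by
  intro n
  induction n with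
  | zero =>
    intro BC SC Sub hn
    rw [is_ord_sub_loop]
    rw [dif_neg (by omega)]
    have h1 : biglst.drop BC = [] := List.drop_eq_nil_of_le (by omega)
    simp [h1, pvMatched]
  | succ n ih =>
    intro BC SC Sub hn
    rw [is_ord_sub_loop]
    split
    · rename_i h
      obtain ⟨hS, hB⟩ := h
      have hsd : smlst.drop SC = smlst[SC] :: smlst.drop (SC + 1) :=
        List.drop_eq_getElem_cons hS
      have hbd : biglst.drop BC = biglst[BC] :: biglst.drop (BC + 1) :=
        List.drop_eq_getElem_cons hB
      have hW : (smlst[SC]?).getD 0 = smlst[SC] := by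
        simp [List.getElem?_eq_getElem hS]
      have hC : (biglst[BC]?).getD 0 = biglst[BC] := by
        simp [List.getElem?_eq_getElem hB]
      simp only [hW, hC]
      by_cases hxy : smlst[SC] = biglst[BC]
      · rw [if_pos hxy, ih (BC + 1) (SC + 1) _ (by omega), hsd, hbd]
        simp [pvMatched, hxy]
      · rw [if_neg hxy, ih (BC + 1) SC _ (by omega), hsd, hbd]
        simp [pvMatched, hxy]
    · rename_i h
      have : smlst.drop SC = [] ∨ biglst.drop BC = [] := by
        rcases Nat.lt_or_ge SC smlst.length with h1 | h1
        · right; exact List.drop_eq_nil_of_le (by omega)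
        · left; exact List.drop_eq_nil_of_le h1
      rcases this with h1 | h1 <;> simp [h1, pvMatched, pvMatched_nil_left]

theorem pvSpec_iff_matched (s b : List Int) :
    pvSpec s b = true ↔ s.length = (pvMatched s b).length := by
  induction b generalizing s with
  | nil =>
    cases s with
    | nil => simp [pvSpec, pvMatched]
    | cons x xs => simp [pvSpec, pvMatched, pvConsume]
  | cons y ys ih =>
    cases s with
    | nil => simp [pvSpec, pvMatched]
    | cons x xs =>
      by_cases h : x = y
      · subst h
        simp only [pvSpec, pvConsume, pvMatched, if_pos]
        simpa [Nat.succ_inj] using ih xs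
      · have hc : pvConsume x (y :: ys) = pvConsume x ys := by
          simp only [pvConsume]
          rw [if_neg (fun hyx => h hyx.symm)]
        have : pvSpec (x :: xs) (y :: ys) = pvSpec (x :: xs) ys := by
          simp only [pvSpec, hc]
        rw [this, pvMatched, if_neg h]
        exact ih (x :: xs)

theorem is_ord_sub_eq_spec (s b : List Int) : is_ord_sub s b = pvSpec s b := by
  unfold is_ord_sub
  simp only []
  rw [is_ord_sub_loop_eq s b b.length 0 0 [] (by omega)]
  simp only [List.nil_append, List.drop_zero]
  by_cases h : pvSpec s b = true
  · rw [if_pos ((pvSpec_iff_matched s b).mp h), h]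
  · rw [if_neg (fun he => h ((pvSpec_iff_matched s b).mpr he))]
    simp only [Bool.not_eq_true] at h
    exact h.symm

---- B-side: the occurrence index ----

-- positions of x in l, offset by s (the contents of pos[x])
def pvOcc (l : List Int) (x : Int) (s : Int) : List Int :=
  match l with
  | [] => []
  | y :: ys => (if y = x then [s] else []) ++ pvOcc ys x (s + 1)

theorem pvOcc_bounds (l : List Int) (x s : Int) :
    ∀ e ∈ pvOcc l x s, s ≤ e ∧ e < s + l.length := by
  induction l generalizing s with
  | nil => simp [pvOcc]
  | cons y ys ih =>
    intro e he
    simp only [pvOcc, List.mem_append] at he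
    rcases he with he | he
    · split at he
      · simp only [List.mem_singleton] at he
        subst he
        refine ⟨le_refl _, ?_⟩
        simp only [List.length_cons]
        push_cast
        omega
      · simp at he
    · have := ih (s + 1) e he
      simp only [List.length_cons]
      push_cast
      omega

theorem pvBuildPos_getD (b : List Int) (x : Int) :
    (pvBuildPos b).getD x [] = pvOcc b x 0 := by
  have main : ∀ (l : List Int) (s : Int) (d : PySem.Dict Int (List Int)),
      ((PySem.List.enumerate l s).foldl
        (fun d p => d.insert p.2 (d.getD p.2 [] ++ [p.1])) d).getD x []
        = d.getD x [] ++ pvOcc l x s := by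
    intro l
    induction l with
    | nil => intro s d; simp [PySem.List.enumerate_nil, pvOcc]
    | cons y ys ih =>
      intro s d
      rw [PySem.List.enumerate_cons, List.foldl_cons, ih]
      dsimp only
      by_cases h : x = y
      · subst h
        rw [PySem.Dict.getD_insert_self]
        simp [pvOcc]
      · rw [PySem.Dict.getD_insert_of_ne _ _ _ h]
        have hne : ¬ y = x := fun hyx => h hyx.symm
        simp [pvOcc, hne]
  simpa using main b 0 PySem.Dict.empty

theorem pvOcc_split (b : List Int) (x : Int) (m : Nat) :
    pvOcc b x 0 = pvOcc (b.take m) x 0 ++ (pvOcc (b.drop m) x (m : Int)) := by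
  have main : ∀ (l : List Int) (m : Nat) (s : Int),
      pvOcc l x s = pvOcc (l.take m) x s ++ pvOcc (l.drop m) x (s + m) := by
    intro l
    induction l with
    | nil => intro m s; simp [pvOcc]
    | cons y ys ih =>
      intro m s
      cases m with
      | zero => simp [pvOcc]
      | succ m =>
        simp only [List.take_succ_cons, List.drop_succ_cons, pvOcc, List.append_assoc]
        rw [ih m (s + 1)]
        congr 2
        push_cast; ring_nf
  simpa using main b m 0

-- the binary-search loop returns t when elements are ≤ cur exactly below position t
theorem pvBisect_eq (idxs : List Int) (cur : Int) (t : Nat)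
    (_ht : t ≤ idxs.length)
    (h1 : ∀ i (h : i < idxs.length), idxs[i] ≤ cur ↔ i < t) :
    ∀ n lo hi, hi - lo ≤ n → lo ≤ t → t ≤ hi → hi ≤ idxs.length →
      pvBisect idxs cur lo hi = t := by
  intro n
  induction n with
  | zero =>
    intro lo hi hn hlo hhi hlen
    rw [pvBisect, dif_neg (by omega)]
    omega
  | succ n ih =>
    intro lo hi hn hlo hhi hlen
    rw [pvBisect]
    split
    · rename_i h
      have hmid : (lo + hi) / 2 < idxs.length := by omega
      have hget : (idxs[(lo + hi) / 2]?).getD 0 = idxs[(lo + hi) / 2] := by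
        simp [List.getElem?_eq_getElem hmid]
      rw [hget]
      by_cases hc : idxs[(lo + hi) / 2] ≤ cur
      · rw [if_pos hc]
        have : (lo + hi) / 2 < t := (h1 _ hmid).mp hc
        exact ih _ _ (by omega) (by omega) hhi hlen
      · rw [if_neg hc]
        have : ¬ (lo + hi) / 2 < t := fun hlt => hc ((h1 _ hmid).mpr hlt)
        exact ih _ _ (by omega) hlo (by omega) (by omega)
    · omega

-- pvConsume in terms of the first occurrence position
theorem pvOcc_shift (l : List Int) (x s : Int) :
    pvOcc l x s = (pvOcc l x 0).map (· + s) := by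
  have main : ∀ (l : List Int) (u v : Int), pvOcc l x (u + v) = (pvOcc l x u).map (· + v) := by
    intro l
    induction l with
    | nil => intro u v; simp [pvOcc]
    | cons z zs ihz =>
      intro u v
      simp only [pvOcc, List.map_append]
      congr 1
      · split <;> simp
      · have := ihz (u + 1) v
        rw [show u + v + 1 = u + 1 + v by ring, this]
  simpa using main l 0 s

theorem pvConsume_eq_occ (l : List Int) (x : Int) :
    pvConsume x l = (pvOcc l x 0).head?.map (fun j => l.drop (j.toNat + 1)) := by
  induction l with
  | nil => simp [pvConsume, pvOcc]
  | cons y ys ih =>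
    by_cases h : y = x
    · simp [pvConsume, pvOcc, h]
    · have hstep : pvOcc (y :: ys) x 0 = (pvOcc ys x 0).map (· + 1) := by
        have h1 : pvOcc (y :: ys) x 0 = pvOcc ys x 1 := by
          simp [pvOcc, h]
        rw [h1, pvOcc_shift ys x 1]
      rw [show pvConsume x (y :: ys) = pvConsume x ys from by simp [pvConsume, h], ih, hstep]
      cases hh : pvOcc ys x 0 with
      | nil => simp
      | cons j js =>
        have hj0 : 0 ≤ j :=
          (pvOcc_bounds ys x 0 j (by rw [hh]; exact List.mem_cons_self)).1
        simp only [List.map_cons, List.head?_cons, Option.map_some]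
        congr 1
        rw [show (j + 1).toNat + 1 = (j.toNat + 1) + 1 from by omega, List.drop_succ_cons]

-- the scan from cursor m-1 is the consume-style spec on the m-th suffix
theorem pvScan_eq_spec (b : List Int) :
    ∀ (s : List Int) (m : Nat),
      pvScan (pvBuildPos b) ((m : Int) - 1) s = pvSpec s (b.drop m) := by
  intro s
  induction s with
  | nil => intro m; simp [pvScan, pvSpec]
  | cons x xs ih =>
    intro m
    rw [pvScan]
    simp only [pvBuildPos_getD]
    set L1 := pvOcc (b.take m) x 0 with hL1
    set occ0 := pvOcc (b.drop m) x 0 with hocc0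
    have hsplit : pvOcc b x 0 = L1 ++ occ0.map (· + (m : Int)) := by
      rw [pvOcc_split b x m, pvOcc_shift (b.drop m) x (m : Int)]
    have hb1 : ∀ e ∈ L1, e ≤ (m : Int) - 1 := by
      intro e he
      have := pvOcc_bounds (b.take m) x 0 e he
      have hlen : (b.take m).length ≤ m := by simp [List.length_take]
      omega
    have hb2 : ∀ e ∈ occ0.map (· + (m : Int)), ¬ e ≤ (m : Int) - 1 := by
      intro e he
      simp only [List.mem_map] at he
      obtain ⟨j, hj, rfl⟩ := he
      have := pvOcc_bounds (b.drop m) x 0 j hj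
      omega
    have hlen : L1.length ≤ (pvOcc b x 0).length := by
      rw [hsplit]; simp
    have hidx : ∀ i (h : i < (pvOcc b x 0).length),
        (pvOcc b x 0)[i] ≤ (m : Int) - 1 ↔ i < L1.length := by
      intro i h
      have hPi := List.getElem_of_eq hsplit h
      rw [hPi]
      by_cases hcase : i < L1.length
      · rw [List.getElem_append_left hcase]
        simp only [hcase, iff_true]
        exact hb1 _ (List.getElem_mem _)
      · rw [List.getElem_append_right (by omega)]
        simp only [hcase, iff_false]
        exact hb2 _ (List.getElem_mem _)
    rw [pvBisect_eq (pvOcc b x 0) ((m : Int) - 1) L1.length hlen hidx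
        (pvOcc b x 0).length 0 (pvOcc b x 0).length (by omega) (by omega) hlen (le_refl _)]
    have hspec : pvSpec (x :: xs) (b.drop m)
        = match pvConsume x (b.drop m) with
          | none => false
          | some rest => pvSpec xs rest := rfl
    cases hocc : occ0 with
    | nil =>
      have hend : L1.length = (pvOcc b x 0).length := by
        rw [hsplit, hocc]; simp
      rw [if_pos hend, hspec, pvConsume_eq_occ, ← hocc0, hocc]
      simp
    | cons j0 jrest =>
      have hlen2 : (pvOcc b x 0).length = L1.length + (jrest.length + 1) := by
        rw [hsplit, hocc]; simp
      have hend : ¬ L1.length = (pvOcc b x 0).length := by omega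
      rw [if_neg hend]
      have hj0 : 0 ≤ j0 := by
        have hmem : j0 ∈ occ0 := by rw [hocc]; exact List.mem_cons_self
        exact (pvOcc_bounds (b.drop m) x 0 j0 hmem).1
      have hgetlen : L1.length < (pvOcc b x 0).length := by omega
      have hget : (pvOcc b x 0)[L1.length]'hgetlen = j0 + (m : Int) := by
        rw [List.getElem_of_eq hsplit hgetlen,
            List.getElem_append_right (le_refl _)]
        simp [hocc]
      have hgetD : ((pvOcc b x 0)[L1.length]?).getD 0 = j0 + (m : Int) := by
        rw [List.getElem?_eq_getElem hgetlen, Option.getD_some, hget]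
      rw [hgetD, hspec, pvConsume_eq_occ, ← hocc0, hocc]
      simp only [List.head?_cons, Option.map_some]
      have hm' : j0 + (m : Int) = ((m + j0.toNat + 1 : Nat) : Int) - 1 := by
        push_cast; omega
      rw [hm', ih (m + j0.toNat + 1)]
      congr 1
      rw [List.drop_drop]
      congr 1
      try omega

-- ===== VERDICT (by name: the statement is the Claim_ definition above) =====
theorem is_ord_sub_spec : Claim_equal_is_ord_sub := by
  intro smlst biglst _
  unfold Spec_is_ord_sub is_ord_sub_alt
  rw [is_ord_sub_eq_spec]
  have := pvScan_eq_spec biglst smlst 0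
  simp only [Nat.cast_zero, zero_sub, List.drop_zero] at this
  exact this.symm
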